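-- pv_equiv track=rewrite | github.com/SonamGadkari/AltarGuildProject | SQLscripts/Calender generator/fullCalenderTest.py | numDayToMDY
-- ===== SOURCE A (Python) =====
-- def leapYear(year):
--     return not((year % 100) %4 == 0 or (((year % 1000) - (year % 100)) % 4 == 0) and (year % 100) ==0)
--
-- def numDayToMDY(dayNum,year):# -> month, Day, Year
--     leap = leapYear(year)
--     monthDays =  (31,28+leap,31,30,31,30,31,31,30,31,30,31)
--     for month in range(12):
--         if dayNum > monthDays[month]:
--             dayNum-=monthDays[month]
--         else:
--             return month+1,dayNum,year
-- ===== SOURCE B (Python) =====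
-- def leapYear(year):
--     return not((year % 100) %4 == 0 or (((year % 1000) - (year % 100)) % 4 == 0) and (year % 100) ==0)
--
-- def numDayToMDY(dayNum, year):  # -> month, Day, Year
--     lengths = (31, 28 + leapYear(year), 31, 30, 31, 30, 31, 31, 30, 31, 30, 31)
--     # cumulative month-end table
--     cum = []
--     total = 0
--     for d in lengths:
--         total += d
--         cum.append(total)
--     # binary search: first index with dayNum <= cum[idx]  (bisect_left by hand)
--     lo, hi = 0, 12
--     while lo < hi:
--         mid = (lo + hi) // 2
--         if cum[mid] < dayNum:
--             lo = mid + 1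
--         else:
--             hi = mid
--     if lo == 12:
--         return None  # dayNum beyond the year, as A (falls off its loop)
--     return lo + 1, dayNum - (cum[lo - 1] if lo else 0), year
-- ===== Notes on version B (the rewrite author's own statement) =====
-- stated objective: alternative
-- what changed: Replaces A's month-by-month subtraction loop with a precomputed cumulative month-end table plus a hand-written bisect_left binary search that locates the month directly.
-- outside the precondition, e.g. on numDayToMDY(400, 2001): A returns None, B returns None
import Mathlib
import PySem

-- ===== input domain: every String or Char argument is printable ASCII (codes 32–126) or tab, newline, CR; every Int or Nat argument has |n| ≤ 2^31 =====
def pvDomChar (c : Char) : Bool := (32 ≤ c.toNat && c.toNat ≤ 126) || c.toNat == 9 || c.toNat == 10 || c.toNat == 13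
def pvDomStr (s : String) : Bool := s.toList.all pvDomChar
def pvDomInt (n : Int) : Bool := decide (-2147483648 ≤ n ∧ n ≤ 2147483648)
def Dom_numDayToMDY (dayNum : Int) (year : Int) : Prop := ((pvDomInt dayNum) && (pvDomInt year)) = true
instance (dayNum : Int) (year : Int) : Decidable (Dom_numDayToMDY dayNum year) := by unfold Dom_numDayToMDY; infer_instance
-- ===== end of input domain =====

-- B replaces A's month-by-month subtraction loop with a cumulative month-end table
-- and a hand-written bisect_left binary search (alternative algorithm, same cost).


-- ===== PORT A =====
def leapYearA (year : Int) : Bool :=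
  !(PySem.Int.mod (PySem.Int.mod year 100) 4 == 0 ||
    (PySem.Int.mod (PySem.Int.mod year 1000 - PySem.Int.mod year 100) 4 == 0 &&
     PySem.Int.mod year 100 == 0))

-- the 'for month in range(12)' loop over monthDays, carrying the mutated dayNum;
-- falling off the loop (Python returns None there, excluded by Pre_) yields (0, 0, 0)
def goA : List Int → Int → Int → Int → Int × Int × Int
  | [], _, _, _ => (0, 0, 0)
  | d :: rest, month, dayNum, year =>
      if dayNum > d then goA rest (month + 1) (dayNum - d) year
      else (month + 1, dayNum, year)

def numDayToMDY (dayNum : Int) (year : Int) : Int × Int × Int :=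
  let leap : Int := if leapYearA year then 1 else 0
  goA [31, 28 + leap, 31, 30, 31, 30, 31, 31, 30, 31, 30, 31] 0 dayNum year

-- ===== PORT B =====
def leapYearB (year : Int) : Bool :=
  !(PySem.Int.mod (PySem.Int.mod year 100) 4 == 0 ||
    (PySem.Int.mod (PySem.Int.mod year 1000 - PySem.Int.mod year 100) 4 == 0 &&
     PySem.Int.mod year 100 == 0))

-- the accumulation loop building the cumulative month-end table cum
def cumB : List Int → Int → List Int
  | [], _ => []
  | d :: rest, total => (total + d) :: cumB rest (total + d)

-- the while-loop of the hand-written bisect_left; the fuel only makes the loop total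
-- (5 bounds its iteration count for hi - lo ≤ 12); indices stay in range, so getD is exact
def bsearchB (cum : List Int) (dayNum : Int) : Nat → Nat → Nat → Nat
  | 0, lo, _ => lo
  | fuel + 1, lo, hi =>
      if lo < hi then
        let mid := (lo + hi) / 2
        if cum.getD mid 0 < dayNum then bsearchB cum dayNum fuel (mid + 1) hi
        else bsearchB cum dayNum fuel lo mid
      else lo

def numDayToMDY_alt (dayNum : Int) (year : Int) : Int × Int × Int :=
  let lengths : List Int :=
    [31, 28 + (if leapYearB year then 1 else 0), 31, 30, 31, 30, 31, 31, 30, 31, 30, 31]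
  let cum := cumB lengths 0
  let lo := bsearchB cum dayNum 5 0 12
  if lo == 12 then (0, 0, 0)  -- Python B returns None here (outside Pre_)
  else ((lo : Int) + 1, dayNum - (if lo == 0 then 0 else cum.getD (lo - 1) 0), year)

-- ===== PRECONDITION & SPEC =====
-- same leap-year formula as the programs, for stating Pre_ without referencing the ports
def pvLeap (year : Int) : Bool :=
  !(PySem.Int.mod (PySem.Int.mod year 100) 4 == 0 ||
    (PySem.Int.mod (PySem.Int.mod year 1000 - PySem.Int.mod year 100) 4 == 0 &&
     PySem.Int.mod year 100 == 0))

-- Pre_ excludes exactly the dayNum beyond the year's total number of days: there Python A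
-- falls off its loop and returns None, which is not a value of the declared type.
def Pre_numDayToMDY (dayNum : Int) (year : Int) : Prop :=
  dayNum ≤ 365 + (if pvLeap year then (1 : Int) else 0)
instance (dayNum : Int) (year : Int) : Decidable (Pre_numDayToMDY dayNum year) := by
  unfold Pre_numDayToMDY; infer_instance

def pvWitness_numDayToMDY : Int × Int := (60, 2024)

def Spec_numDayToMDY (dayNum : Int) (year : Int) (out : Int × Int × Int) : Prop := out = numDayToMDY_alt dayNum year
instance (dayNum : Int) (year : Int) (out : Int × Int × Int) : Decidable (Spec_numDayToMDY dayNum year out) := by unfold Spec_numDayToMDY; infer_instance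

-- ===== CLAIM (what is proved, stated in full; the proofs are below) =====
def Claim_equal_numDayToMDY : Prop := ∀ (dayNum : Int) (year : Int), Dom_numDayToMDY dayNum year → Pre_numDayToMDY dayNum year → Spec_numDayToMDY dayNum year (numDayToMDY dayNum year)

-- ===== LEMMAS AND PROOFS =====

theorem bs0_0 (d : Int) (hh : d ≤ 31) :
    bsearchB [31,59,90,120,151,181,212,243,273,304,334,365] d 5 0 12 = 0 := by
  simp only [bsearchB, List.getD]; norm_num; split_ifs <;> omega

theorem bs0_1 (d : Int) (hl : 31 < d) (hh : d ≤ 59) :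
    bsearchB [31,59,90,120,151,181,212,243,273,304,334,365] d 5 0 12 = 1 := by
  simp only [bsearchB, List.getD]; norm_num; split_ifs <;> omega

theorem bs0_2 (d : Int) (hl : 59 < d) (hh : d ≤ 90) :
    bsearchB [31,59,90,120,151,181,212,243,273,304,334,365] d 5 0 12 = 2 := by
  simp only [bsearchB, List.getD]; norm_num; split_ifs <;> omega

theorem bs0_3 (d : Int) (hl : 90 < d) (hh : d ≤ 120) :
    bsearchB [31,59,90,120,151,181,212,243,273,304,334,365] d 5 0 12 = 3 := by
  simp only [bsearchB, List.getD]; norm_num; split_ifs <;> omega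

theorem bs0_4 (d : Int) (hl : 120 < d) (hh : d ≤ 151) :
    bsearchB [31,59,90,120,151,181,212,243,273,304,334,365] d 5 0 12 = 4 := by
  simp only [bsearchB, List.getD]; norm_num; split_ifs <;> omega

theorem bs0_5 (d : Int) (hl : 151 < d) (hh : d ≤ 181) :
    bsearchB [31,59,90,120,151,181,212,243,273,304,334,365] d 5 0 12 = 5 := by
  simp only [bsearchB, List.getD]; norm_num; split_ifs <;> omega

theorem bs0_6 (d : Int) (hl : 181 < d) (hh : d ≤ 212) :
    bsearchB [31,59,90,120,151,181,212,243,273,304,334,365] d 5 0 12 = 6 := by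
  simp only [bsearchB, List.getD]; norm_num; split_ifs <;> omega

theorem bs0_7 (d : Int) (hl : 212 < d) (hh : d ≤ 243) :
    bsearchB [31,59,90,120,151,181,212,243,273,304,334,365] d 5 0 12 = 7 := by
  simp only [bsearchB, List.getD]; norm_num; split_ifs <;> omega

theorem bs0_8 (d : Int) (hl : 243 < d) (hh : d ≤ 273) :
    bsearchB [31,59,90,120,151,181,212,243,273,304,334,365] d 5 0 12 = 8 := by
  simp only [bsearchB, List.getD]; norm_num; split_ifs <;> omega

theorem bs0_9 (d : Int) (hl : 273 < d) (hh : d ≤ 304) :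
    bsearchB [31,59,90,120,151,181,212,243,273,304,334,365] d 5 0 12 = 9 := by
  simp only [bsearchB, List.getD]; norm_num; split_ifs <;> omega

theorem bs0_10 (d : Int) (hl : 304 < d) (hh : d ≤ 334) :
    bsearchB [31,59,90,120,151,181,212,243,273,304,334,365] d 5 0 12 = 10 := by
  simp only [bsearchB, List.getD]; norm_num; split_ifs <;> omega

theorem bs0_11 (d : Int) (hl : 334 < d) (hh : d ≤ 365) :
    bsearchB [31,59,90,120,151,181,212,243,273,304,334,365] d 5 0 12 = 11 := by
  simp only [bsearchB, List.getD]; norm_num; split_ifs <;> omega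

set_option maxHeartbeats 1000000 in
theorem agree_leap0 (d y : Int) (hpre : d ≤ 365) :
    goA [31, 28 + 0, 31, 30, 31, 30, 31, 31, 30, 31, 30, 31] 0 d y =
    (let cum : List Int := cumB [31, 28 + 0, 31, 30, 31, 30, 31, 31, 30, 31, 30, 31] 0
     let lo := bsearchB cum d 5 0 12
     if lo == 12 then (0, 0, 0)
     else ((lo : Int) + 1, d - (if lo == 0 then 0 else cum.getD (lo - 1) 0), y)) := by
  have hc : cumB [31, 28 + 0, 31, 30, 31, 30, 31, 31, 30, 31, 30, 31] 0 = [31,59,90,120,151,181,212,243,273,304,334,365] := by norm_num [cumB]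
  simp only [hc]
  by_cases h0 : d ≤ 31
  · rw [goA, if_neg (by omega)]
    rw [bs0_0 d (by omega)]
    norm_num [List.getD]
  by_cases h1 : d ≤ 59
  · rw [goA, if_pos (by omega)]
    rw [goA, if_neg (by omega)]
    rw [bs0_1 d (by omega) (by omega)]
    norm_num [List.getD]
  by_cases h2 : d ≤ 90
  · rw [goA, if_pos (by omega)]
    rw [goA, if_pos (by omega)]
    rw [goA, if_neg (by omega)]
    rw [bs0_2 d (by omega) (by omega)]
    norm_num [List.getD]
    omega
  by_cases h3 : d ≤ 120
  · rw [goA, if_pos (by omega)]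
    rw [goA, if_pos (by omega)]
    rw [goA, if_pos (by omega)]
    rw [goA, if_neg (by omega)]
    rw [bs0_3 d (by omega) (by omega)]
    norm_num [List.getD]
    omega
  by_cases h4 : d ≤ 151
  · rw [goA, if_pos (by omega)]
    rw [goA, if_pos (by omega)]
    rw [goA, if_pos (by omega)]
    rw [goA, if_pos (by omega)]
    rw [goA, if_neg (by omega)]
    rw [bs0_4 d (by omega) (by omega)]
    norm_num [List.getD]
    omega
  by_cases h5 : d ≤ 181
  · rw [goA, if_pos (by omega)]
    rw [goA, if_pos (by omega)]
    rw [goA, if_pos (by omega)]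
    rw [goA, if_pos (by omega)]
    rw [goA, if_pos (by omega)]
    rw [goA, if_neg (by omega)]
    rw [bs0_5 d (by omega) (by omega)]
    norm_num [List.getD]
    omega
  by_cases h6 : d ≤ 212
  · rw [goA, if_pos (by omega)]
    rw [goA, if_pos (by omega)]
    rw [goA, if_pos (by omega)]
    rw [goA, if_pos (by omega)]
    rw [goA, if_pos (by omega)]
    rw [goA, if_pos (by omega)]
    rw [goA, if_neg (by omega)]
    rw [bs0_6 d (by omega) (by omega)]
    norm_num [List.getD]
    omega
  by_cases h7 : d ≤ 243
  · rw [goA, if_pos (by omega)]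
    rw [goA, if_pos (by omega)]
    rw [goA, if_pos (by omega)]
    rw [goA, if_pos (by omega)]
    rw [goA, if_pos (by omega)]
    rw [goA, if_pos (by omega)]
    rw [goA, if_pos (by omega)]
    rw [goA, if_neg (by omega)]
    rw [bs0_7 d (by omega) (by omega)]
    norm_num [List.getD]
    omega
  by_cases h8 : d ≤ 273
  · rw [goA, if_pos (by omega)]
    rw [goA, if_pos (by omega)]
    rw [goA, if_pos (by omega)]
    rw [goA, if_pos (by omega)]
    rw [goA, if_pos (by omega)]
    rw [goA, if_pos (by omega)]
    rw [goA, if_pos (by omega)]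
    rw [goA, if_pos (by omega)]
    rw [goA, if_neg (by omega)]
    rw [bs0_8 d (by omega) (by omega)]
    norm_num [List.getD]
    omega
  by_cases h9 : d ≤ 304
  · rw [goA, if_pos (by omega)]
    rw [goA, if_pos (by omega)]
    rw [goA, if_pos (by omega)]
    rw [goA, if_pos (by omega)]
    rw [goA, if_pos (by omega)]
    rw [goA, if_pos (by omega)]
    rw [goA, if_pos (by omega)]
    rw [goA, if_pos (by omega)]
    rw [goA, if_pos (by omega)]
    rw [goA, if_neg (by omega)]
    rw [bs0_9 d (by omega) (by omega)]
    norm_num [List.getD]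
    omega
  by_cases h10 : d ≤ 334
  · rw [goA, if_pos (by omega)]
    rw [goA, if_pos (by omega)]
    rw [goA, if_pos (by omega)]
    rw [goA, if_pos (by omega)]
    rw [goA, if_pos (by omega)]
    rw [goA, if_pos (by omega)]
    rw [goA, if_pos (by omega)]
    rw [goA, if_pos (by omega)]
    rw [goA, if_pos (by omega)]
    rw [goA, if_pos (by omega)]
    rw [goA, if_neg (by omega)]
    rw [bs0_10 d (by omega) (by omega)]
    norm_num [List.getD]
    omega
  rw [goA, if_pos (by omega)]
  rw [goA, if_pos (by omega)]
  rw [goA, if_pos (by omega)]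
  rw [goA, if_pos (by omega)]
  rw [goA, if_pos (by omega)]
  rw [goA, if_pos (by omega)]
  rw [goA, if_pos (by omega)]
  rw [goA, if_pos (by omega)]
  rw [goA, if_pos (by omega)]
  rw [goA, if_pos (by omega)]
  rw [goA, if_pos (by omega)]
  rw [goA, if_neg (by omega)]
  rw [bs0_11 d (by omega) (by omega)]
  norm_num [List.getD]
  omega

theorem bs1_0 (d : Int) (hh : d ≤ 31) :
    bsearchB [31,60,91,121,152,182,213,244,274,305,335,366] d 5 0 12 = 0 := by
  simp only [bsearchB, List.getD]; norm_num; split_ifs <;> omega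

theorem bs1_1 (d : Int) (hl : 31 < d) (hh : d ≤ 60) :
    bsearchB [31,60,91,121,152,182,213,244,274,305,335,366] d 5 0 12 = 1 := by
  simp only [bsearchB, List.getD]; norm_num; split_ifs <;> omega

theorem bs1_2 (d : Int) (hl : 60 < d) (hh : d ≤ 91) :
    bsearchB [31,60,91,121,152,182,213,244,274,305,335,366] d 5 0 12 = 2 := by
  simp only [bsearchB, List.getD]; norm_num; split_ifs <;> omega

theorem bs1_3 (d : Int) (hl : 91 < d) (hh : d ≤ 121) :
    bsearchB [31,60,91,121,152,182,213,244,274,305,335,366] d 5 0 12 = 3 := by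
  simp only [bsearchB, List.getD]; norm_num; split_ifs <;> omega

theorem bs1_4 (d : Int) (hl : 121 < d) (hh : d ≤ 152) :
    bsearchB [31,60,91,121,152,182,213,244,274,305,335,366] d 5 0 12 = 4 := by
  simp only [bsearchB, List.getD]; norm_num; split_ifs <;> omega

theorem bs1_5 (d : Int) (hl : 152 < d) (hh : d ≤ 182) :
    bsearchB [31,60,91,121,152,182,213,244,274,305,335,366] d 5 0 12 = 5 := by
  simp only [bsearchB, List.getD]; norm_num; split_ifs <;> omega

theorem bs1_6 (d : Int) (hl : 182 < d) (hh : d ≤ 213) :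
    bsearchB [31,60,91,121,152,182,213,244,274,305,335,366] d 5 0 12 = 6 := by
  simp only [bsearchB, List.getD]; norm_num; split_ifs <;> omega

theorem bs1_7 (d : Int) (hl : 213 < d) (hh : d ≤ 244) :
    bsearchB [31,60,91,121,152,182,213,244,274,305,335,366] d 5 0 12 = 7 := by
  simp only [bsearchB, List.getD]; norm_num; split_ifs <;> omega

theorem bs1_8 (d : Int) (hl : 244 < d) (hh : d ≤ 274) :
    bsearchB [31,60,91,121,152,182,213,244,274,305,335,366] d 5 0 12 = 8 := by
  simp only [bsearchB, List.getD]; norm_num; split_ifs <;> omega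

theorem bs1_9 (d : Int) (hl : 274 < d) (hh : d ≤ 305) :
    bsearchB [31,60,91,121,152,182,213,244,274,305,335,366] d 5 0 12 = 9 := by
  simp only [bsearchB, List.getD]; norm_num; split_ifs <;> omega

theorem bs1_10 (d : Int) (hl : 305 < d) (hh : d ≤ 335) :
    bsearchB [31,60,91,121,152,182,213,244,274,305,335,366] d 5 0 12 = 10 := by
  simp only [bsearchB, List.getD]; norm_num; split_ifs <;> omega

theorem bs1_11 (d : Int) (hl : 335 < d) (hh : d ≤ 366) :
    bsearchB [31,60,91,121,152,182,213,244,274,305,335,366] d 5 0 12 = 11 := by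
  simp only [bsearchB, List.getD]; norm_num; split_ifs <;> omega

set_option maxHeartbeats 1000000 in
theorem agree_leap1 (d y : Int) (hpre : d ≤ 366) :
    goA [31, 28 + 1, 31, 30, 31, 30, 31, 31, 30, 31, 30, 31] 0 d y =
    (let cum : List Int := cumB [31, 28 + 1, 31, 30, 31, 30, 31, 31, 30, 31, 30, 31] 0
     let lo := bsearchB cum d 5 0 12
     if lo == 12 then (0, 0, 0)
     else ((lo : Int) + 1, d - (if lo == 0 then 0 else cum.getD (lo - 1) 0), y)) := by
  have hc : cumB [31, 28 + 1, 31, 30, 31, 30, 31, 31, 30, 31, 30, 31] 0 = [31,60,91,121,152,182,213,244,274,305,335,366] := by norm_num [cumB]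
  simp only [hc]
  by_cases h0 : d ≤ 31
  · rw [goA, if_neg (by omega)]
    rw [bs1_0 d (by omega)]
    norm_num [List.getD]
  by_cases h1 : d ≤ 60
  · rw [goA, if_pos (by omega)]
    rw [goA, if_neg (by omega)]
    rw [bs1_1 d (by omega) (by omega)]
    norm_num [List.getD]
  by_cases h2 : d ≤ 91
  · rw [goA, if_pos (by omega)]
    rw [goA, if_pos (by omega)]
    rw [goA, if_neg (by omega)]
    rw [bs1_2 d (by omega) (by omega)]
    norm_num [List.getD]
    omega
  by_cases h3 : d ≤ 121
  · rw [goA, if_pos (by omega)]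
    rw [goA, if_pos (by omega)]
    rw [goA, if_pos (by omega)]
    rw [goA, if_neg (by omega)]
    rw [bs1_3 d (by omega) (by omega)]
    norm_num [List.getD]
    omega
  by_cases h4 : d ≤ 152
  · rw [goA, if_pos (by omega)]
    rw [goA, if_pos (by omega)]
    rw [goA, if_pos (by omega)]
    rw [goA, if_pos (by omega)]
    rw [goA, if_neg (by omega)]
    rw [bs1_4 d (by omega) (by omega)]
    norm_num [List.getD]
    omega
  by_cases h5 : d ≤ 182
  · rw [goA, if_pos (by omega)]
    rw [goA, if_pos (by omega)]
    rw [goA, if_pos (by omega)]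
    rw [goA, if_pos (by omega)]
    rw [goA, if_pos (by omega)]
    rw [goA, if_neg (by omega)]
    rw [bs1_5 d (by omega) (by omega)]
    norm_num [List.getD]
    omega
  by_cases h6 : d ≤ 213
  · rw [goA, if_pos (by omega)]
    rw [goA, if_pos (by omega)]
    rw [goA, if_pos (by omega)]
    rw [goA, if_pos (by omega)]
    rw [goA, if_pos (by omega)]
    rw [goA, if_pos (by omega)]
    rw [goA, if_neg (by omega)]
    rw [bs1_6 d (by omega) (by omega)]
    norm_num [List.getD]
    omega
  by_cases h7 : d ≤ 244
  · rw [goA, if_pos (by omega)]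
    rw [goA, if_pos (by omega)]
    rw [goA, if_pos (by omega)]
    rw [goA, if_pos (by omega)]
    rw [goA, if_pos (by omega)]
    rw [goA, if_pos (by omega)]
    rw [goA, if_pos (by omega)]
    rw [goA, if_neg (by omega)]
    rw [bs1_7 d (by omega) (by omega)]
    norm_num [List.getD]
    omega
  by_cases h8 : d ≤ 274
  · rw [goA, if_pos (by omega)]
    rw [goA, if_pos (by omega)]
    rw [goA, if_pos (by omega)]
    rw [goA, if_pos (by omega)]
    rw [goA, if_pos (by omega)]
    rw [goA, if_pos (by omega)]
    rw [goA, if_pos (by omega)]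
    rw [goA, if_pos (by omega)]
    rw [goA, if_neg (by omega)]
    rw [bs1_8 d (by omega) (by omega)]
    norm_num [List.getD]
    omega
  by_cases h9 : d ≤ 305
  · rw [goA, if_pos (by omega)]
    rw [goA, if_pos (by omega)]
    rw [goA, if_pos (by omega)]
    rw [goA, if_pos (by omega)]
    rw [goA, if_pos (by omega)]
    rw [goA, if_pos (by omega)]
    rw [goA, if_pos (by omega)]
    rw [goA, if_pos (by omega)]
    rw [goA, if_pos (by omega)]
    rw [goA, if_neg (by omega)]
    rw [bs1_9 d (by omega) (by omega)]
    norm_num [List.getD]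
    omega
  by_cases h10 : d ≤ 335
  · rw [goA, if_pos (by omega)]
    rw [goA, if_pos (by omega)]
    rw [goA, if_pos (by omega)]
    rw [goA, if_pos (by omega)]
    rw [goA, if_pos (by omega)]
    rw [goA, if_pos (by omega)]
    rw [goA, if_pos (by omega)]
    rw [goA, if_pos (by omega)]
    rw [goA, if_pos (by omega)]
    rw [goA, if_pos (by omega)]
    rw [goA, if_neg (by omega)]
    rw [bs1_10 d (by omega) (by omega)]
    norm_num [List.getD]
    omega
  rw [goA, if_pos (by omega)]
  rw [goA, if_pos (by omega)]
  rw [goA, if_pos (by omega)]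
  rw [goA, if_pos (by omega)]
  rw [goA, if_pos (by omega)]
  rw [goA, if_pos (by omega)]
  rw [goA, if_pos (by omega)]
  rw [goA, if_pos (by omega)]
  rw [goA, if_pos (by omega)]
  rw [goA, if_pos (by omega)]
  rw [goA, if_pos (by omega)]
  rw [goA, if_neg (by omega)]
  rw [bs1_11 d (by omega) (by omega)]
  norm_num [List.getD]
  omega

-- ===== VERDICT (by name: the statement is the Claim_ definition above) =====
theorem numDayToMDY_spec : Claim_equal_numDayToMDY := by
  intro d y _ hpre
  unfold Spec_numDayToMDY numDayToMDY numDayToMDY_alt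
  unfold Pre_numDayToMDY at hpre
  rw [show leapYearB y = leapYearA y from rfl]
  rw [show pvLeap y = leapYearA y from rfl] at hpre
  cases hb : leapYearA y
  · rw [hb] at hpre
    simp only [Bool.false_eq_true, if_false] at hpre
    exact agree_leap0 d y (by omega)
  · rw [hb] at hpre
    simp only [if_true] at hpre
    exact agree_leap1 d y (by omega)
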